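-- pv_equiv track=rewrite | github.com/EpykLab/stllr-mcp | .jjconflict-side-1/src/stellarbridge_mcp/multipart_s3_upload.py | byte_ranges_for_parts
-- ===== SOURCE A (Python) =====
-- def byte_ranges_for_parts(
--     total_size: int, part_size_bytes: int, num_parts: int
-- ) -> list[tuple[int, int]]:
--     """Return (offset, length) for each part in sequential order."""
--     if num_parts < 1:
--         raise ValueError("num_parts must be >= 1")
--     ranges: list[tuple[int, int]] = []
--     offset = 0
--     for _ in range(num_parts):
--         remaining = total_size - offset
--         if remaining <= 0:
--             length = 0
--         else:
--             length = min(part_size_bytes, remaining)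
--         ranges.append((offset, length))
--         offset += length
--     return ranges
-- ===== SOURCE B (Python) =====
-- def byte_ranges_for_parts(
--     total_size: int, part_size_bytes: int, num_parts: int
-- ) -> list[tuple[int, int]]:
--     """Return (offset, length) for each part in sequential order."""
--     if num_parts < 1:
--         raise ValueError("num_parts must be >= 1")
--
--     def b(i: int) -> int:
--         return min(i * part_size_bytes, total_size) if total_size > 0 else 0
--
--     return [(b(i), b(i + 1) - b(i)) for i in range(num_parts)]
-- ===== Notes on version B (the rewrite author's own statement) =====
-- stated objective: alternative
-- what changed: B replaces A's sequential offset/remaining accumulation loop with a closed-form boundary function b(i) = min(i*part_size_bytes, total_size) (0 when total_size <= 0) and builds each part as (b(i), b(i+1)-b(i)) independently per index.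
-- outside the precondition, e.g. on byte_ranges_for_parts(10, 4, 0): A raises ValueError, B raises ValueError
import Mathlib
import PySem

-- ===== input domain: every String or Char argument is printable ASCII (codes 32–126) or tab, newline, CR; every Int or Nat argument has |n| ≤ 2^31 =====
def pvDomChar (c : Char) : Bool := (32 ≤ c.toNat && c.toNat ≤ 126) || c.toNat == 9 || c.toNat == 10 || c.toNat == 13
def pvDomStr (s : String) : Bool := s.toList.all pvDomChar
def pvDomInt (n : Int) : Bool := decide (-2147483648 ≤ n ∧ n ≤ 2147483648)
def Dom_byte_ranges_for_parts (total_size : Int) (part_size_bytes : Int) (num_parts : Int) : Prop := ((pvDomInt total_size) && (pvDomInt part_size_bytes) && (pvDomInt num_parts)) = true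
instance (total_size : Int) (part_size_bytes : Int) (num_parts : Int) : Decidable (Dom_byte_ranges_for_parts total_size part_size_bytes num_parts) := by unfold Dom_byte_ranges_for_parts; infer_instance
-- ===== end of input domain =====

-- B replaces A's running-offset loop by a closed-form per-index boundary formula (objective: alternative, same O(n) cost).

-- ===== PORT A =====
-- A: loop over range(num_parts), accumulating (ranges, offset); num_parts < 1 raises (excluded by Pre_).
def byte_ranges_for_parts (total_size : Int) (part_size_bytes : Int) (num_parts : Int) : List (Int × Int) :=
  if num_parts < 1 then []  -- Python raises ValueError here; Pre_ excludes this case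
  else
    ((PySem.List.pyRange 0 num_parts 1).foldl
      (fun (st : List (Int × Int) × Int) _ =>
        let remaining := total_size - st.2
        let length := if remaining ≤ 0 then 0 else min part_size_bytes remaining
        (st.1 ++ [(st.2, length)], st.2 + length))
      ([], 0)).1

-- ===== PORT B =====
-- B helper: boundary position of part i, in closed form.
def pvBnd (total_size : Int) (part_size_bytes : Int) (i : Int) : Int :=
  if total_size > 0 then min (i * part_size_bytes) total_size else 0

def byte_ranges_for_parts_alt (total_size : Int) (part_size_bytes : Int) (num_parts : Int) : List (Int × Int) :=
  if num_parts < 1 then []  -- Python raises ValueError here; Pre_ excludes this case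
  else
    (PySem.List.pyRange 0 num_parts 1).map
      (fun i => (pvBnd total_size part_size_bytes i,
                 pvBnd total_size part_size_bytes (i + 1) - pvBnd total_size part_size_bytes i))

-- ===== PRECONDITION & SPEC =====
-- Pre_ excludes num_parts < 1, where the Python A (and B) raise ValueError.
def Pre_byte_ranges_for_parts (total_size : Int) (part_size_bytes : Int) (num_parts : Int) : Prop :=
  1 ≤ num_parts
instance (total_size : Int) (part_size_bytes : Int) (num_parts : Int) : Decidable (Pre_byte_ranges_for_parts total_size part_size_bytes num_parts) := by unfold Pre_byte_ranges_for_parts; infer_instance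

def pvWitness_byte_ranges_for_parts : Int × Int × Int := (10, 4, 3)

def Spec_byte_ranges_for_parts (total_size : Int) (part_size_bytes : Int) (num_parts : Int) (out : List (Int × Int)) : Prop := out = byte_ranges_for_parts_alt total_size part_size_bytes num_parts
instance (total_size : Int) (part_size_bytes : Int) (num_parts : Int) (out : List (Int × Int)) : Decidable (Spec_byte_ranges_for_parts total_size part_size_bytes num_parts out) := by unfold Spec_byte_ranges_for_parts; infer_instance

-- ===== CLAIM (what is proved, stated in full; the proofs are below) =====
def Claim_equal_byte_ranges_for_parts : Prop := ∀ (total_size : Int) (part_size_bytes : Int) (num_parts : Int), Dom_byte_ranges_for_parts total_size part_size_bytes num_parts → Pre_byte_ranges_for_parts total_size part_size_bytes num_parts → Spec_byte_ranges_for_parts total_size part_size_bytes num_parts (byte_ranges_for_parts total_size part_size_bytes num_parts)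

-- ===== LEMMAS AND PROOFS =====

-- The step of A's loop, started at offset pvBnd t ps k, produces length pvBnd t ps (k+1) - pvBnd t ps k.
theorem pvBnd_step (t ps : Int) (k : Int) (hk : 0 ≤ k) :
    (if t - pvBnd t ps k ≤ 0 then 0 else min ps (t - pvBnd t ps k))
      = pvBnd t ps (k + 1) - pvBnd t ps k := by
  unfold pvBnd
  by_cases ht : t > 0
  · simp only [ht, if_pos]
    by_cases h : t ≤ k * ps
    · have hps : 0 < ps := by nlinarith
      have h2 : t ≤ (k + 1) * ps := by nlinarith
      simp only [min_eq_right h, min_eq_right h2]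
      simp
    · push Not at h
      have : min (k * ps) t = k * ps := min_eq_left h.le
      rw [this]
      have hrem : ¬ (t - k * ps ≤ 0) := by omega
      rw [if_neg hrem]
      have : (k + 1) * ps = k * ps + ps := by ring
      rw [this]
      by_cases h2 : k * ps + ps ≤ t
      · rw [min_eq_left h2, min_eq_left (by omega : ps ≤ t - k * ps)]; ring
      · push Not at h2
        rw [min_eq_right h2.le, min_eq_right (by omega : t - k * ps ≤ ps)]
  · rw [if_neg ht, if_neg ht]
    rw [if_pos (by omega : t - 0 ≤ 0)]
    omega

-- Invariant of A's fold over pyRange k n 1 (for 0 ≤ k ≤ n): starting from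
-- (B's map of pyRange 0 k 1, pvBnd t ps k), it ends with B's full map and offset pvBnd t ps n.
theorem pv_loop_inv (t ps : Int) (n : Int) (k : Int) (h0 : 0 ≤ k) (hkn : k ≤ n) :
    ((PySem.List.pyRange k n 1).foldl
      (fun (st : List (Int × Int) × Int) _ =>
        let remaining := t - st.2
        let length := if remaining ≤ 0 then 0 else min ps remaining
        (st.1 ++ [(st.2, length)], st.2 + length))
      ((PySem.List.pyRange 0 k 1).map
        (fun i => (pvBnd t ps i, pvBnd t ps (i + 1) - pvBnd t ps i)), pvBnd t ps k))
    = ((PySem.List.pyRange 0 n 1).map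
        (fun i => (pvBnd t ps i, pvBnd t ps (i + 1) - pvBnd t ps i)), pvBnd t ps n) := by
  have hd : (n - k).toNat ≤ (n - 0).toNat := by omega
  generalize hm : (n - k).toNat = m at *
  induction m generalizing k with
  | zero =>
    have hkn' : n ≤ k := by omega
    have hk' : k = n := by omega
    subst hk'
    rw [PySem.List.pyRange_one_eq_nil le_rfl]
    simp
  | succ m ih =>
    have hlt : k < n := by omega
    rw [PySem.List.pyRange_one_cons hlt]
    simp only [List.foldl_cons]
    have hstep := pvBnd_step t ps k h0
    have harr : (PySem.List.pyRange 0 k 1).map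
          (fun i => (pvBnd t ps i, pvBnd t ps (i + 1) - pvBnd t ps i))
          ++ [(pvBnd t ps k, pvBnd t ps (k + 1) - pvBnd t ps k)]
        = (PySem.List.pyRange 0 (k + 1) 1).map
          (fun i => (pvBnd t ps i, pvBnd t ps (i + 1) - pvBnd t ps i)) := by
      rw [PySem.List.pyRange_one_succ_right h0]
      simp
    have := ih (k + 1) (by omega) (by omega) (by omega) (by omega)
    simp only [hstep] at *
    rw [show pvBnd t ps k + (pvBnd t ps (k + 1) - pvBnd t ps k) = pvBnd t ps (k + 1) by ring,
        harr]
    exact this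

theorem pvBnd_zero (t ps : Int) : pvBnd t ps 0 = 0 := by
  unfold pvBnd
  split_ifs with h
  · simp [min_eq_left h.le]
  · rfl

-- ===== VERDICT (by name: the statement is the Claim_ definition above) =====
theorem byte_ranges_for_parts_spec : Claim_equal_byte_ranges_for_parts := by
  intro t ps n _ hpre
  unfold Spec_byte_ranges_for_parts byte_ranges_for_parts byte_ranges_for_parts_alt
  have hn : ¬ n < 1 := by exact not_lt.mpr hpre
  rw [if_neg hn, if_neg hn]
  have h := pv_loop_inv t ps n 0 le_rfl (by omega)
  rw [PySem.List.pyRange_one_eq_nil le_rfl] at h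
  simp only [List.map_nil] at h
  rw [pvBnd_zero] at h
  rw [h]
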